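-- pv_equiv track=rewrite | github.com/Shunyang2018/QCEIMS-analysis | tools/compare/msp2excel_TMS.py | read_blocks
-- ===== SOURCE A (Python) =====
-- def read_blocks(file):
--     block = []
--     for line in file:
--         if line.startswith('Name:') and len(block)>0:
--             yield block
--             block = []
--
--         block.append(line)
--     yield block
-- ===== SOURCE B (Python) =====
-- def read_blocks(file):
--     # Two-stage: find block boundaries, then slice the file at them.
--     lines = list(file)
--     # a 'Name:' line opens a new block, except at the very start of the file
--     edges = [0]
--     edges += [i for i, ln in enumerate(lines) if i > 0 and ln.startswith('Name:')]
--     edges.append(len(lines))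
--     for a, b in zip(edges, edges[1:]):
--         yield lines[a:b]
-- ===== Notes on version B (the rewrite author's own statement) =====
-- stated objective: alternative
-- what changed: A streams the file once, flushing an accumulator block before each non-initial 'Name:' line; B first computes the list of boundary indices (every 'Name:' line past the start) and then emits the slices between consecutive boundaries.
import Mathlib
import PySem

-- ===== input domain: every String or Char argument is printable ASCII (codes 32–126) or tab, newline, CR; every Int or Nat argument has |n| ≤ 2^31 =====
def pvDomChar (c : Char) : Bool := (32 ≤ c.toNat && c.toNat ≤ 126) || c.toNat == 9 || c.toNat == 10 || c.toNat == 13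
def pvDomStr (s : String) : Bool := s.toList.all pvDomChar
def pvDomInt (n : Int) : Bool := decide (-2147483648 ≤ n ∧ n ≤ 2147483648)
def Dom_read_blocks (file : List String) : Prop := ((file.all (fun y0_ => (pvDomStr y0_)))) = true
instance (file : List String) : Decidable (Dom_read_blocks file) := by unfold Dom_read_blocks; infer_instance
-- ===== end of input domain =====

-- B replaces A's single accumulate-and-flush pass by a staged decomposition:
-- compute the boundary indices first, then slice the file between consecutive
-- boundaries; same output, no speed claim.

-- ===== PORT A =====
-- A's loop body: flush the accumulated block before a 'Name:' line when nonempty, then append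
def stepA (st : List (List String) × List String) (line : String) :
    List (List String) × List String :=
  if PySem.Str.startswith line "Name:" && decide (st.2.length > 0) then
    (st.1 ++ [st.2], [line])
  else
    (st.1, st.2 ++ [line])

-- forward loop over the file; the final accumulated block is yielded last
def read_blocks (file : List String) : List (List String) :=
  let st := file.foldl stepA ([], [])
  st.1 ++ [st.2]

-- ===== PORT B =====
-- Source B's edges list: 0, every 'Name:' line index past 0, and len(lines)
def edgesB (lines : List String) : List Int :=
  [0] ++
    ((PySem.List.enumerate lines).filter
      (fun p => decide (0 < p.1) && PySem.Str.startswith p.2 "Name:")).map Prod.fst ++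
    [(lines.length : Int)]

-- slice the file between consecutive edges
def read_blocks_alt (file : List String) : List (List String) :=
  ((edgesB file).zip (edgesB file).tail).map
    (fun p => PySem.List.slice file (some p.1) (some p.2))

-- ===== PRECONDITION & SPEC =====
def Spec_read_blocks (file : List String) (out : List (List String)) : Prop := out = read_blocks_alt file
instance (file : List String) (out : List (List String)) : Decidable (Spec_read_blocks file out) := by unfold Spec_read_blocks; infer_instance

-- ===== CLAIM (what is proved, stated in full; the proofs are below) =====
def Claim_equal_read_blocks : Prop := ∀ (file : List String), Dom_read_blocks file → Spec_read_blocks file (read_blocks file)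

-- ===== LEMMAS AND PROOFS =====

-- recursion mirroring A's loop
def splitRecA (ls : List String) (b : List String) : List (List String) :=
  match ls with
  | [] => [b]
  | x :: xs =>
    if PySem.Str.startswith x "Name:" && decide (b.length > 0) then
      b :: splitRecA xs [x]
    else
      splitRecA xs (b ++ [x])

theorem readA_foldl (ls : List String) (bs : List (List String)) (b : List String) :
    (ls.foldl stepA (bs, b)).1 ++ [(ls.foldl stepA (bs, b)).2] = bs ++ splitRecA ls b := by
  induction ls generalizing bs b with
  | nil => simp [splitRecA]
  | cons x xs ih =>
    simp only [List.foldl_cons, splitRecA, stepA]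
    by_cases h : (PySem.Str.startswith x "Name:" && decide (b.length > 0)) = true
    · simp only [h, if_true, ih]; simp
    · simp only [h] at *
      simp [ih]

-- positions (offset by s) of the 'Name:' lines of ls
def nameIdxs (ls : List String) (s : Nat) : List Nat :=
  match ls with
  | [] => []
  | x :: xs =>
    if PySem.Str.startswith x "Name:" then s :: nameIdxs xs (s + 1)
    else nameIdxs xs (s + 1)

-- Nat-edge version of B's slicing stage
def segN (lines : List String) (es : List Nat) : List (List String) :=
  (es.zip es.tail).map (fun p => (lines.drop p.1).take (p.2 - p.1))

theorem nameIdxs_shift (ls : List String) (s k : Nat) :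
    nameIdxs ls (s + k) = (nameIdxs ls s).map (· + k) := by
  induction ls generalizing s with
  | nil => simp [nameIdxs]
  | cons x xs ih =>
    simp only [nameIdxs]
    split_ifs with h
    · rw [show s + k + 1 = (s + 1) + k by omega, ih]; simp
    · rw [show s + k + 1 = (s + 1) + k by omega, ih]

theorem zip_tail_map {α β : Type} (f : α → β) (es : List α) :
    ((es.map f).zip (es.map f).tail) = (es.zip es.tail).map (fun p => (f p.1, f p.2)) := by
  rw [← List.map_tail, List.zip_map]
  rfl

theorem segN_shift (b ys : List String) (es : List Nat) :
    segN (b ++ ys) (es.map (· + b.length)) = segN ys es := by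
  unfold segN
  rw [zip_tail_map, List.map_map]
  refine List.map_congr_left ?_
  intro p _
  simp only [Function.comp_apply]
  have h1 : p.1 + b.length = b.length + p.1 := by omega
  have h2 : p.2 + b.length - (b.length + p.1) = p.2 - p.1 := by omega
  rw [h1, h2, List.drop_append, List.drop_eq_nil_of_le (by omega), List.nil_append,
    show b.length + p.1 - b.length = p.1 by omega]

theorem splitRecA_eq_segN (ls : List String) (b : List String) (hb : b ≠ []) :
    splitRecA ls b = segN (b ++ ls) ([0] ++ nameIdxs ls b.length ++ [b.length + ls.length]) := by
  induction ls generalizing b with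
  | nil => simp [splitRecA, nameIdxs, segN]
  | cons x xs ih =>
    have hlen : decide (b.length > 0) = true := by simp [List.length_pos_iff, hb]
    cases h : PySem.Str.startswith x "Name:" with
    | false =>
      simp only [splitRecA, h, hlen, Bool.false_and, Bool.false_eq_true, if_false]
      rw [ih (b ++ [x]) (by simp)]
      have e1 : (b ++ [x]).length = b.length + 1 := by simp
      rw [e1, List.append_assoc]
      simp only [List.singleton_append, List.length_cons]
      conv_rhs => rw [show nameIdxs (x :: xs) b.length = nameIdxs xs (b.length + 1) from by
        simp only [nameIdxs, h, Bool.false_eq_true, if_false]]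
      rw [show b.length + 1 + xs.length = b.length + (xs.length + 1) by omega]
    | true =>
      simp only [splitRecA, h, hlen, Bool.and_self, if_true]
      rw [ih [x] (by simp)]
      have e1 : ([x] : List String).length = 1 := by simp
      rw [e1, List.singleton_append,
        show ([0] ++ nameIdxs xs 1 ++ [1 + xs.length] : List Nat)
          = 0 :: (nameIdxs xs 1 ++ [1 + xs.length]) from by simp]
      have hshift := segN_shift b (x :: xs) (0 :: (nameIdxs xs 1 ++ [1 + xs.length]))
      have hedges : (0 :: (nameIdxs xs 1 ++ [1 + xs.length])).map (· + b.length)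
          = b.length :: (nameIdxs xs (b.length + 1) ++ [b.length + (xs.length + 1)]) := by
        have := nameIdxs_shift xs 1 b.length
        rw [show (1 : Nat) + b.length = b.length + 1 by omega] at this
        simp [this, show (1 : Nat) + xs.length + b.length = b.length + (xs.length + 1) by omega]
      rw [hedges] at hshift
      -- RHS edges: 0 :: b.length :: rest
      conv_rhs => rw [show nameIdxs (x :: xs) b.length = b.length :: nameIdxs xs (b.length + 1) from by
        simp only [nameIdxs, h, if_true]]
      show _ = segN (b ++ x :: xs)
        (0 :: b.length :: (nameIdxs xs (b.length + 1) ++ [b.length + (x :: xs).length]))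
      rw [show (x :: xs).length = xs.length + 1 from by simp]
      unfold segN
      simp only [List.tail_cons, List.zip_cons_cons, List.map_cons]
      congr 1
      · rw [Nat.sub_zero, List.drop_zero,
          show b.length = (b : List String).length from rfl, List.take_left]
      · unfold segN at hshift
        simp only [List.tail_cons] at hshift
        rw [hshift]

theorem enum_filter_eq (ls : List String) (s : Nat) (hs : 1 ≤ s) :
    ((PySem.List.enumerate ls (s : Int)).filter
        (fun p => decide (0 < p.1) && PySem.Str.startswith p.2 "Name:")).map Prod.fst
      = (nameIdxs ls s).map (fun (n : Nat) => (n : Int)) := by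
  induction ls generalizing s with
  | nil => simp [PySem.List.enumerate_nil, nameIdxs]
  | cons x xs ih =>
    rw [PySem.List.enumerate_cons]
    have hpos : (0 : Int) < (s : Int) := by exact_mod_cast hs
    have hc : ((s : Int) + 1) = ((s + 1 : Nat) : Int) := by push_cast; ring
    cases h : PySem.Str.startswith x "Name:" with
    | false =>
      simp only [List.filter_cons, h, Bool.and_false, nameIdxs, Bool.false_eq_true, if_false]
      rw [hc, ih (s + 1) (by omega)]
    | true =>
      simp only [List.filter_cons, h, Bool.and_true, hpos, decide_true, nameIdxs, if_true,
        List.map_cons]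
      rw [hc, ih (s + 1) (by omega)]

theorem segI_eq_segN (lines : List String) (es : List Nat) :
    (((es.map (fun (n : Nat) => (n : Int))).zip (es.map (fun (n : Nat) => (n : Int))).tail).map
        (fun p => PySem.List.slice lines (some p.1) (some p.2)))
      = segN lines es := by
  unfold segN
  rw [zip_tail_map (fun n => ((n : Nat) : Int)) es, List.map_map]
  refine List.map_congr_left ?_
  intro p _
  simp only [Function.comp_apply]
  exact PySem.List.slice_natCast lines p.1 p.2

theorem read_blocks_eq (file : List String) :
    read_blocks file = read_blocks_alt file := by
  cases file with
  | nil => decide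
  | cons l ls =>
    have ha : read_blocks (l :: ls) = splitRecA ls [l] := by
      have h0 : stepA ([], []) l = ([], [l]) := by simp [stepA]
      have := readA_foldl ls [] [l]
      simp only [read_blocks, List.foldl_cons, h0]
      simpa using this
    have hfilter := enum_filter_eq ls 1 (le_refl 1)
    have hedges : edgesB (l :: ls) = ([0] ++ nameIdxs ls 1 ++ [1 + ls.length]).map (fun (n : Nat) => (n : Int)) := by
      unfold edgesB
      rw [PySem.List.enumerate_cons]
      simp only [List.filter_cons, lt_self_iff_false, decide_false,
        Bool.false_and, Bool.false_eq_true, if_false]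
      rw [show ((0 : Int) + 1) = ((1 : Nat) : Int) by norm_num, hfilter]
      simp only [List.map_append, List.map_cons, List.map_nil, List.length_cons]
      push_cast
      simp [add_comm]
    have hb : read_blocks_alt (l :: ls) = segN (l :: ls) ([0] ++ nameIdxs ls 1 ++ [1 + ls.length]) := by
      unfold read_blocks_alt
      rw [hedges, segI_eq_segN]
    rw [ha, hb]
    have := splitRecA_eq_segN ls [l] (by simp)
    simpa using this

-- ===== VERDICT (by name: the statement is the Claim_ definition above) =====
theorem read_blocks_spec : Claim_equal_read_blocks := by
  intro file _
  unfold Spec_read_blocks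
  exact read_blocks_eq file
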